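-- pv_equiv track=rewrite | github.com/brit05h/CSCI-133 | test3.py | cleanedup
-- ===== SOURCE A (Python) =====
-- def cleanedup(s):
--     letterssymbol = 'abcdefghijklmnopqrstuvwxyz@'
--     cleantext = ''
--     for character in s.lower():
--         if character in letterssymbol:
--             cleantext += character
--         else:
--             cleantext += ' '
--     return cleantext
-- ===== SOURCE B (Python) =====
-- def cleanedup(s):
--     t = s.lower()
--     bad = set(t) - set('abcdefghijklmnopqrstuvwxyz@')
--     return t.translate({ord(c): ' ' for c in bad})
-- ===== Notes on version B (the rewrite author's own statement) =====
-- stated objective: idiomatic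
-- what changed: B lowercases once, computes the set of distinct disallowed characters present via set difference, and replaces them all in one str.translate pass instead of A's per-character loop with membership test and string concatenation.
import Mathlib
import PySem

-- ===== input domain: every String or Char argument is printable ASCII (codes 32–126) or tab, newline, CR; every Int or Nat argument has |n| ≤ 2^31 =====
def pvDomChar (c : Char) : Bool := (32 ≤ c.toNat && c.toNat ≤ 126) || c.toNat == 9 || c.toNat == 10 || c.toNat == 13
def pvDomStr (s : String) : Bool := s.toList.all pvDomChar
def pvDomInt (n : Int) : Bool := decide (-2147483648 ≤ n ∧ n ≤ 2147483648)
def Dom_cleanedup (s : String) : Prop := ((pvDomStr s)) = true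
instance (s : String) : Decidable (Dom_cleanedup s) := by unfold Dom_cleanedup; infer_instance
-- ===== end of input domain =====

-- B replaces A's per-character loop with membership test and string accumulation by one
-- lowercase pass, a set difference computing the distinct disallowed characters present,
-- and a single translate pass over that table (objective: idiomatic; not claimed faster).

-- ===== PORT A =====
-- letterssymbol = 'abcdefghijklmnopqrstuvwxyz@'
def cleanedupLetterssymbol : List Char := "abcdefghijklmnopqrstuvwxyz@".toList

def cleanedup (s : String) : String :=
  -- for character in s.lower(): if character in letterssymbol: cleantext += character else: cleantext += ' '
  String.ofList ((PySem.Str.lower s).toList.foldl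
    (fun cleantext character =>
      if PySem.Chars.isIn [character] cleanedupLetterssymbol then cleantext ++ [character]
      else cleantext ++ [' ']) [])

-- ===== PORT B =====
def cleanedup_alt (s : String) : String :=
  let t := (PySem.Str.lower s).toList
  let bad := PySem.Set.diff (PySem.Set.ofList t)
      (PySem.Set.ofList "abcdefghijklmnopqrstuvwxyz@".toList)
  -- t.translate({ord(c): ' ' for c in bad}): every key of the table (value always ' ')
  -- maps to ' ', characters not in the table pass through unchanged — exact for this table
  String.ofList (t.map (fun c => if PySem.Set.contains bad c then ' ' else c))

-- ===== PRECONDITION & SPEC =====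
def Spec_cleanedup (s : String) (out : String) : Prop := out = cleanedup_alt s
instance (s : String) (out : String) : Decidable (Spec_cleanedup s out) := by unfold Spec_cleanedup; infer_instance

-- ===== CLAIM (what is proved, stated in full; the proofs are below) =====
def Claim_equal_cleanedup : Prop := ∀ (s : String), Dom_cleanedup s → Spec_cleanedup s (cleanedup s)

-- ===== LEMMAS AND PROOFS =====

theorem cleanedup_isIn_singleton (c : Char) (l : List Char) :
    PySem.Chars.isIn [c] l = true ↔ c ∈ l := by
  rw [PySem.Chars.isIn_iff_infix]
  constructor
  · intro h; exact List.singleton_sublist.mp h.sublist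
  · intro h
    obtain ⟨u, v, rfl⟩ := List.append_of_mem h
    exact ⟨u, v, by simp⟩

theorem cleanedup_foldl_eq_map (p : Char → Bool) (t : List Char) (acc : List Char) :
    t.foldl (fun cleantext character =>
        if p character then cleantext ++ [character] else cleantext ++ [' ']) acc
      = acc ++ t.map (fun c => if p c then c else ' ') := by
  induction t generalizing acc with
  | nil => simp
  | cons c t ih =>
    simp only [List.foldl_cons, List.map_cons, ih]
    by_cases h : p c = true <;> simp [h]

-- ===== VERDICT (by name: the statement is the Claim_ definition above) =====
theorem cleanedup_spec : Claim_equal_cleanedup := by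
  intro s _
  unfold Spec_cleanedup cleanedup cleanedup_alt
  simp only [cleanedup_foldl_eq_map, List.nil_append]
  refine congrArg String.ofList (List.map_congr_left ?_)
  intro c hc
  by_cases h : c ∈ cleanedupLetterssymbol
  · have h1 : PySem.Chars.isIn [c] cleanedupLetterssymbol = true :=
      (cleanedup_isIn_singleton c _).mpr h
    have h2 : PySem.Set.contains
        (PySem.Set.diff (PySem.Set.ofList (PySem.Str.lower s).toList)
          (PySem.Set.ofList "abcdefghijklmnopqrstuvwxyz@".toList)) c = false := by
      rw [Bool.eq_false_iff]
      intro hcon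
      have := (PySem.Set.mem_diff _ _ _).mp ((PySem.Set.contains_iff _ _).mp hcon)
      exact this.2 ((PySem.Set.mem_ofList _ _).mpr h)
    rw [h1, h2]
    rfl
  · have h1 : PySem.Chars.isIn [c] cleanedupLetterssymbol = false := by
      rw [Bool.eq_false_iff]
      intro hcon
      exact h ((cleanedup_isIn_singleton c _).mp hcon)
    have h2 : PySem.Set.contains
        (PySem.Set.diff (PySem.Set.ofList (PySem.Str.lower s).toList)
          (PySem.Set.ofList "abcdefghijklmnopqrstuvwxyz@".toList)) c = true := by
      rw [PySem.Set.contains_iff, PySem.Set.mem_diff]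
      exact ⟨(PySem.Set.mem_ofList _ _).mpr hc, fun hmem => h ((PySem.Set.mem_ofList _ _).mp hmem)⟩
    rw [h1, h2]
    rfl
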